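-- pv_equiv track=rewrite | github.com/lagameon/EFM | .memory/lib/working_memory.py | _count_phases
-- ===== SOURCE A (Python) =====
-- from typing import Dict, List, Optional, Tuple
--
-- def _count_phases(plan_text: str) -> Tuple[int, int]:
--     """Count total phases and completed phases in task_plan.md."""
--     total = 0
--     done = 0
--     in_phases = False
--     for line in plan_text.splitlines():
--         if line.strip().startswith("## Phases"):
--             in_phases = True
--             continue
--         if in_phases and line.strip().startswith("## "):
--             break  # Next section
--         if in_phases and line.strip().startswith("### Phase"):
--             total += 1
--             # Phase is done when header contains [DONE] marker
--             if "[DONE]" in line or "[done]" in line: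
--                 done += 1
--     return total, done
-- ===== SOURCE B (Python) =====
-- def _count_phases(plan_text):
--     """Count total phases and completed phases in task_plan.md."""
--     lines = plan_text.splitlines()
--     start = next((i for i, l in enumerate(lines)
--                   if l.strip().startswith("## Phases")), None)
--     if start is None:
--         return (0, 0)
--     rest = lines[start + 1:]
--     end = next((j for j, l in enumerate(rest)
--                 if l.strip().startswith("## ")
--                 and not l.strip().startswith("## Phases")), len(rest))
--     block = [l for l in rest[:end] if l.strip().startswith("### Phase")]
--     total = len(block)
--     done = len([l for l in block if "[DONE]" in l or "[done]" in l])
--     return (total, done)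
-- ===== Notes on version B (the rewrite author's own statement) =====
-- stated objective: alternative
-- what changed: Replaces A's single stateful loop (in_phases flag, continue, break) with an index search that isolates the Phases block by slicing, then counts headers and [DONE] markers with comprehensions over that block.
import Mathlib
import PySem

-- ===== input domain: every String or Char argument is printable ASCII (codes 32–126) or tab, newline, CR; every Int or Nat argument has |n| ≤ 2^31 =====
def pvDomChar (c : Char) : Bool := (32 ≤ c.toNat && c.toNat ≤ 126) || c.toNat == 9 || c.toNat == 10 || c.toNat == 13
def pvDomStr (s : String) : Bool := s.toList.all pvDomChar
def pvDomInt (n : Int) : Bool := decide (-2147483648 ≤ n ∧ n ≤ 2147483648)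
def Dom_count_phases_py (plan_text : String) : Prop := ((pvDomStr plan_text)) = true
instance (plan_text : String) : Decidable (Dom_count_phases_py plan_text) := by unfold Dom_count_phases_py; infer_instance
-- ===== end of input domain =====

-- B isolates the '## Phases' block by index search and slicing, then counts with
-- comprehensions over that block — a different decomposition (no stateful flag/break loop); same cost.

-- ===== PORT A =====
-- the for-loop with `in_phases` flag, `continue` and `break`, as structural recursion
def countPhasesLoopA : List String → Int → Int → Bool → Int × Int
  | [], total, done, _ => (total, done)
  | l :: rest, total, done, inPhases =>
    if PySem.Str.startswith (PySem.Str.strip l) "## Phases" then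
      countPhasesLoopA rest total done true
    else if inPhases && PySem.Str.startswith (PySem.Str.strip l) "## " then
      (total, done)  -- break
    else if inPhases && PySem.Str.startswith (PySem.Str.strip l) "### Phase" then
      countPhasesLoopA rest (total + 1)
        (if PySem.Str.isIn "[DONE]" l || PySem.Str.isIn "[done]" l then done + 1 else done)
        inPhases
    else
      countPhasesLoopA rest total done inPhases

def count_phases_py (plan_text : String) : Int × Int :=
  countPhasesLoopA (PySem.Str.splitlines plan_text) 0 0 false

-- ===== PORT B =====
def count_phases_py_alt (plan_text : String) : Int × Int :=
  let lines := PySem.Str.splitlines plan_text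
  match lines.findIdx? (fun l => PySem.Str.startswith (PySem.Str.strip l) "## Phases") with
  | none => (0, 0)
  | some start =>
    let rest := lines.drop (start + 1)
    let stop := (rest.findIdx? (fun l =>
        PySem.Str.startswith (PySem.Str.strip l) "## " &&
        !PySem.Str.startswith (PySem.Str.strip l) "## Phases")).getD rest.length
    let block := (rest.take stop).filter
        (fun l => PySem.Str.startswith (PySem.Str.strip l) "### Phase")
    ((block.length : Int),
     ((block.filter (fun l => PySem.Str.isIn "[DONE]" l || PySem.Str.isIn "[done]" l)).length : Int))

-- ===== PRECONDITION & SPEC =====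
def Spec_count_phases_py (plan_text : String) (out : Int × Int) : Prop := out = count_phases_py_alt plan_text
instance (plan_text : String) (out : Int × Int) : Decidable (Spec_count_phases_py plan_text out) := by unfold Spec_count_phases_py; infer_instance

-- ===== CLAIM (what is proved, stated in full; the proofs are below) =====
def Claim_equal_count_phases_py : Prop := ∀ (plan_text : String), Dom_count_phases_py plan_text → Spec_count_phases_py plan_text (count_phases_py plan_text)

-- ===== LEMMAS AND PROOFS =====

-- the inner (in_phases = true) computation, as B performs it on the tail `rest`
def pvBlockCount (rest : List String) : Int × Int :=
  let stop := (rest.findIdx? (fun l =>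
      PySem.Str.startswith (PySem.Str.strip l) "## " &&
      !PySem.Str.startswith (PySem.Str.strip l) "## Phases")).getD rest.length
  let block := (rest.take stop).filter
      (fun l => PySem.Str.startswith (PySem.Str.strip l) "### Phase")
  ((block.length : Int),
   ((block.filter (fun l => PySem.Str.isIn "[DONE]" l || PySem.Str.isIn "[done]" l)).length : Int))

-- a line whose strip starts with "## Phases" does not start with "### Phase"
lemma phases_not_phase (cs : List Char)
    (h : PySem.Chars.startswith cs ['#', '#', ' ', 'P', 'h', 'a', 's', 'e', 's'] = true) :
    PySem.Chars.startswith cs ['#', '#', '#', ' ', 'P', 'h', 'a', 's', 'e'] = false := by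
  by_contra hc
  rw [Bool.not_eq_false] at hc
  rw [PySem.Chars.startswith_iff] at h hc
  have hd := List.prefix_or_prefix_of_prefix h hc
  revert hd; decide

lemma getD_map_succ (o : Option Nat) (n : Nat) :
    (o.map (fun i => i + 1)).getD (n + 1) = o.getD n + 1 := by
  cases o <;> rfl

lemma pvBlockCount_cons (l : String) (rs : List String) :
    pvBlockCount (l :: rs) =
      if PySem.Str.startswith (PySem.Str.strip l) "## " &&
         !PySem.Str.startswith (PySem.Str.strip l) "## Phases" then (0, 0)
      else if PySem.Str.startswith (PySem.Str.strip l) "### Phase" then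
        ((pvBlockCount rs).1 + 1,
         if PySem.Str.isIn "[DONE]" l || PySem.Str.isIn "[done]" l then (pvBlockCount rs).2 + 1
         else (pvBlockCount rs).2)
      else pvBlockCount rs := by
  by_cases hP : PySem.Chars.startswith (PySem.Chars.strip l.toList) ['#', '#', ' ', 'P', 'h', 'a', 's', 'e', 's'] = true
  · have hH := phases_not_phase _ hP
    simp [pvBlockCount, List.findIdx?_cons, hP, hH, getD_map_succ]
  · rw [Bool.not_eq_true] at hP
    by_cases hS : PySem.Chars.startswith (PySem.Chars.strip l.toList) ['#', '#', ' '] = true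
    · simp [pvBlockCount, List.findIdx?_cons, hP, hS]
    · rw [Bool.not_eq_true] at hS
      by_cases hH : PySem.Chars.startswith (PySem.Chars.strip l.toList) ['#', '#', '#', ' ', 'P', 'h', 'a', 's', 'e'] = true
      · by_cases hD1 : PySem.Chars.isIn ['[', 'D', 'O', 'N', 'E', ']'] l.toList = true
        · simp [pvBlockCount, List.findIdx?_cons, hP, hS, hH, hD1, getD_map_succ]
        · rw [Bool.not_eq_true] at hD1
          by_cases hD2 : PySem.Chars.isIn ['[', 'd', 'o', 'n', 'e', ']'] l.toList = true
          · simp [pvBlockCount, List.findIdx?_cons, hP, hS, hH, hD1, hD2, getD_map_succ]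
          · rw [Bool.not_eq_true] at hD2
            simp [pvBlockCount, List.findIdx?_cons, hP, hS, hH, hD1, hD2, getD_map_succ]
      · rw [Bool.not_eq_true] at hH
        simp [pvBlockCount, List.findIdx?_cons, hP, hS, hH, getD_map_succ]

lemma loopA_true (rest : List String) (t d : Int) :
    countPhasesLoopA rest t d true = (t + (pvBlockCount rest).1, d + (pvBlockCount rest).2) := by
  induction rest generalizing t d with
  | nil => simp [countPhasesLoopA, pvBlockCount]
  | cons l rs ih =>
    rw [pvBlockCount_cons]
    unfold countPhasesLoopA
    by_cases hP : PySem.Chars.startswith (PySem.Chars.strip l.toList) ['#', '#', ' ', 'P', 'h', 'a', 's', 'e', 's'] = true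
    · have hH := phases_not_phase _ hP
      simp [hP, hH, ih]
    · rw [Bool.not_eq_true] at hP
      by_cases hS : PySem.Chars.startswith (PySem.Chars.strip l.toList) ['#', '#', ' '] = true
      · simp [hP, hS]
      · rw [Bool.not_eq_true] at hS
        by_cases hH : PySem.Chars.startswith (PySem.Chars.strip l.toList) ['#', '#', '#', ' ', 'P', 'h', 'a', 's', 'e'] = true
        · by_cases hD1 : PySem.Chars.isIn ['[', 'D', 'O', 'N', 'E', ']'] l.toList = true
          · simp [hP, hS, hH, hD1, ih, Prod.ext_iff]
            constructor <;> ring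
          · rw [Bool.not_eq_true] at hD1
            by_cases hD2 : PySem.Chars.isIn ['[', 'd', 'o', 'n', 'e', ']'] l.toList = true
            · simp [hP, hS, hH, hD1, hD2, ih, Prod.ext_iff]
              constructor <;> ring
            · rw [Bool.not_eq_true] at hD2
              simp [hP, hS, hH, hD1, hD2, ih, Prod.ext_iff]
              ring
        · rw [Bool.not_eq_true] at hH
          simp [hP, hS, hH, ih]

lemma loopA_false (lines : List String) :
    countPhasesLoopA lines 0 0 false =
      match lines.findIdx? (fun l => PySem.Str.startswith (PySem.Str.strip l) "## Phases") with
      | none => (0, 0)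
      | some start => pvBlockCount (lines.drop (start + 1)) := by
  induction lines with
  | nil => simp [countPhasesLoopA]
  | cons l rs ih =>
    by_cases hP : PySem.Chars.startswith (PySem.Chars.strip l.toList) ['#', '#', ' ', 'P', 'h', 'a', 's', 'e', 's'] = true
    · simp [countPhasesLoopA, List.findIdx?_cons, hP, loopA_true]
    · rw [Bool.not_eq_true] at hP
      unfold countPhasesLoopA
      rw [ih]
      simp only [List.findIdx?_cons]
      simp [hP]
      cases hF : List.findIdx?
          (fun l => PySem.Chars.startswith (PySem.Chars.strip l.toList) ['#', '#', ' ', 'P', 'h', 'a', 's', 'e', 's']) rs with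
      | none => rfl
      | some k => simp

-- ===== VERDICT (by name: the statement is the Claim_ definition above) =====
theorem count_phases_py_spec : Claim_equal_count_phases_py := by
  intro plan_text _
  unfold Spec_count_phases_py count_phases_py count_phases_py_alt
  rw [loopA_false]
  cases h : (PySem.Str.splitlines plan_text).findIdx?
      (fun l => PySem.Str.startswith (PySem.Str.strip l) "## Phases") with
  | none => simp only [h]
  | some start => simp only [h]; rfl
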